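-- pv_equiv track=rewrite | github.com/friha438/MSc_MT | scoring_shifts.py | score_recovery
-- ===== SOURCE A (Python) =====
-- def score_recovery(min_rec):
--     score = []
--     for h in min_rec:
--         if h > 48:
--             score.append(3)
--         elif (h > 27) and (h < 49):
--             score.append(2)
--         elif (h > 10) and (h < 28):
--             score.append(1)
--         else:
--             score.append(0)
--     return score
-- ===== SOURCE B (Python) =====
-- def score_recovery(min_rec):
--     return [sum(1 for t in (10, 27, 48) if h > t) for h in min_rec]
-- ===== Notes on version B (the rewrite author's own statement) =====
-- stated objective: idiomatic
-- what changed: Replaces the four-way if/elif chain with a comprehension that counts thresholds (10, 27, 48) strictly below each hour value.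
import Mathlib
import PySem

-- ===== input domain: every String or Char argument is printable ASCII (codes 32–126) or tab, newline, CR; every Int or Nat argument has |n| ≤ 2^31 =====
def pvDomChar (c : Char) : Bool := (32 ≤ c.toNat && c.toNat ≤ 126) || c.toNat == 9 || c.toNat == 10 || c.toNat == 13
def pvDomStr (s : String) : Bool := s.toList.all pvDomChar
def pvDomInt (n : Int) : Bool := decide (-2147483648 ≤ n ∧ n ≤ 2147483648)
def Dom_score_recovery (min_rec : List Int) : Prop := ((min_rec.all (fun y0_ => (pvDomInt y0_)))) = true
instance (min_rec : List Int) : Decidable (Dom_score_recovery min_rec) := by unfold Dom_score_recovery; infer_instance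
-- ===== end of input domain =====

-- ===== PORT A =====
-- Port of A: loop over min_rec appending the score from the if/elif chain.
def score_recovery (min_rec : List Int) : List Int :=
  min_rec.foldl (fun score h =>
    if h > 48 then score ++ [3]
    else if h > 27 ∧ h < 49 then score ++ [2]
    else if h > 10 ∧ h < 28 then score ++ [1]
    else score ++ [0]) []

-- ===== PORT B =====
-- Port of B: count thresholds in (10, 27, 48) strictly below h, for each h.
def score_recovery_alt (min_rec : List Int) : List Int :=
  min_rec.map (fun h => ([10, 27, 48] : List Int).foldl (fun acc t => if h > t then acc + 1 else acc) 0)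

-- ===== PRECONDITION & SPEC =====
def Spec_score_recovery (min_rec : List Int) (out : List Int) : Prop := out = score_recovery_alt min_rec
instance (min_rec : List Int) (out : List Int) : Decidable (Spec_score_recovery min_rec out) := by unfold Spec_score_recovery; infer_instance

-- ===== CLAIM (what is proved, stated in full; the proofs are below) =====
def Claim_equal_score_recovery : Prop := ∀ (min_rec : List Int), Dom_score_recovery min_rec → Spec_score_recovery min_rec (score_recovery min_rec)

-- ===== LEMMAS AND PROOFS =====

-- ===== VERDICT (by name: the statement is the Claim_ definition above) =====
theorem score_recovery_alt_cons (h : Int) (hs : List Int) :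
    score_recovery_alt (h :: hs) =
      (if h > 48 then 3 else if h > 27 ∧ h < 49 then 2 else if h > 10 ∧ h < 28 then 1 else 0)
        :: score_recovery_alt hs := by
  simp only [score_recovery_alt, List.map]
  congr 1
  simp only [List.foldl]
  split_ifs <;> omega

theorem score_recovery_loop (hs : List Int) (acc : List Int) :
    hs.foldl (fun score h =>
      if h > 48 then score ++ [3]
      else if h > 27 ∧ h < 49 then score ++ [2]
      else if h > 10 ∧ h < 28 then score ++ [1]
      else score ++ [0]) acc = acc ++ score_recovery_alt hs := by
  induction hs generalizing acc with
  | nil => simp [score_recovery_alt]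
  | cons h t ih =>
    rw [score_recovery_alt_cons, List.foldl_cons]
    split_ifs <;> simp [ih]

theorem score_recovery_spec : Claim_equal_score_recovery := by
  intro min_rec _
  unfold Spec_score_recovery score_recovery
  simpa using score_recovery_loop min_rec []
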